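-- pv_equiv track=rewrite | github.com/chen-yifu/NLP-EMR-Pipeline | pipeline/util/regex_tools.py | make_punc_regex_literal
-- ===== SOURCE A (Python) =====
-- def make_punc_regex_literal(str_with_punc: str) -> str:
--     """
--     Changes punctuation in a word so regex pattern will interpret it literally.
--     Example:
--     - indication? -> indication\?
--
--     :param str_with_punc:
--     :return:
--     """
--     fixed_str = ""
--     punc = ("?", "(", ")", "\\", "/")
--     for l in str_with_punc:
--         if l in punc:
--             fixed_str += "\\" + l + "*"
--         else:
--             fixed_str += l
--     return fixed_str
-- ===== SOURCE B (Python) =====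
-- def make_punc_regex_literal(str_with_punc: str) -> str:
--     # Five staged whole-string replace passes, one per punctuation char.
--     # The backslash pass runs first so that later passes never touch the
--     # backslashes inserted by the escaping itself (and no later char occurs
--     # in any inserted replacement text).
--     s = str_with_punc
--     for c in "\\?()/":
--         s = s.replace(c, "\\" + c + "*")
--     return s
-- ===== Notes on version B (the rewrite author's own statement) =====
-- stated objective: alternative
-- what changed: Replaced A's single per-character loop with an if/else branch and accumulator by five staged whole-string str.replace passes (one per punctuation char, backslash pass first so later passes never touch inserted escapes).
import Mathlib
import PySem

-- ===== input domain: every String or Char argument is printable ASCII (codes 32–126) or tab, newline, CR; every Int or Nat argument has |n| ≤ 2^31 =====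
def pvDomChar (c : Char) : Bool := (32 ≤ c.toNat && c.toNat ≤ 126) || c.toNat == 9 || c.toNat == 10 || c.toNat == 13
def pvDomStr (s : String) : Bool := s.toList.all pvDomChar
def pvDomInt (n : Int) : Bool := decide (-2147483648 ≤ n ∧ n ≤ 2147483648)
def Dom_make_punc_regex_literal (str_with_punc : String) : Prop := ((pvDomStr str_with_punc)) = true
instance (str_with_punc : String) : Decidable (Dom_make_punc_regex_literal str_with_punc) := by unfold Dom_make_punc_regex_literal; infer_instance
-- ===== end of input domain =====

-- B replaces A's single per-character accumulator loop by five staged whole-string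
-- str.replace passes (backslash pass first), a different traversal; a timing run measured B faster (constant factor, C-level replace).

-- ===== PORT A =====
-- punc = ("?", "(", ")", "\\", "/")
def puncA : List Char := ['?', '(', ')', '\\', '/']

-- literal port of A's loop: fold over the characters with the string accumulator fixed_str
def make_punc_regex_literal (str_with_punc : String) : String :=
  str_with_punc.toList.foldl
    (fun fixed_str l =>
      if l ∈ puncA then fixed_str ++ "\\" ++ String.ofList [l] ++ "*"
      else fixed_str ++ String.ofList [l]) ""

-- ===== PORT B =====
-- for c in "\\?()/": s = s.replace(c, "\\" + c + "*")
def puncB : List Char := ['\\', '?', '(', ')', '/']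

def make_punc_regex_literal_alt (str_with_punc : String) : String :=
  puncB.foldl
    (fun s c => PySem.Str.replace s (String.ofList [c]) (String.ofList ['\\', c, '*']))
    str_with_punc

-- ===== PRECONDITION & SPEC =====
def Spec_make_punc_regex_literal (str_with_punc : String) (out : String) : Prop := out = make_punc_regex_literal_alt str_with_punc
instance (str_with_punc : String) (out : String) : Decidable (Spec_make_punc_regex_literal str_with_punc out) := by unfold Spec_make_punc_regex_literal; infer_instance

-- ===== CLAIM (what is proved, stated in full; the proofs are below) =====
def Claim_equal_make_punc_regex_literal : Prop := ∀ (str_with_punc : String), Dom_make_punc_regex_literal str_with_punc → Spec_make_punc_regex_literal str_with_punc (make_punc_regex_literal str_with_punc)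

-- ===== LEMMAS AND PROOFS =====

-- per-character effect of one single-char replace pass
def pvRep1 (c : Char) (new : List Char) (ch : Char) : List Char :=
  if ch = c then new else [ch]

-- replace.go on a single-char pattern, with enough fuel, is a flatMap
theorem go_single (c : Char) (new : List Char) :
    ∀ (fuel : Nat) (l acc : List Char), l.length ≤ fuel →
      PySem.Chars.replace.go [c] new fuel l acc
        = acc.reverse ++ l.flatMap (pvRep1 c new) := by
  intro fuel
  induction fuel with
  | zero =>
      intro l acc h
      have : l = [] := List.length_eq_zero_iff.mp (Nat.le_zero.mp h)
      subst this
      simp [PySem.Chars.replace.go]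
  | succ n ih =>
      intro l acc h
      cases l with
      | nil => simp [PySem.Chars.replace.go]
      | cons ch t =>
          simp only [PySem.Chars.replace.go]
          by_cases hc : ch = c
          · subst hc
            have hp : List.isPrefixOf [ch] (ch :: t) = true := by
              simp [List.isPrefixOf]
            rw [if_pos hp]
            have ht : t.length ≤ n := by simpa using Nat.succ_le_succ_iff.mp (by simpa using h)
            rw [show List.drop (List.length [ch]) (ch :: t) = t from by simp]
            rw [ih t (new.reverse ++ acc) ht]
            simp [pvRep1, List.flatMap_cons]
          · have hp : List.isPrefixOf [c] (ch :: t) = false := by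
              simp [List.isPrefixOf]
              exact fun hcc => absurd hcc.symm hc
            rw [if_neg (by simp [hp])]
            have ht : t.length ≤ n := by simpa using Nat.succ_le_succ_iff.mp (by simpa using h)
            rw [ih t (ch :: acc) ht]
            simp [pvRep1, List.flatMap_cons, hc]

theorem replace_single (s : List Char) (c : Char) (new : List Char) :
    PySem.Chars.replace s [c] new = s.flatMap (pvRep1 c new) := by
  unfold PySem.Chars.replace
  rw [if_neg (by simp)]
  simpa using go_single c new s.length s [] (le_refl _)

-- composed per-character effect of the five passes of B
def pvStageBS (ch : Char) : List Char :=
  (((((pvRep1 '\\' ['\\','\\','*'] ch).flatMap (pvRep1 '?' ['\\','?','*'])).flatMap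
      (pvRep1 '(' ['\\','(','*'])).flatMap (pvRep1 ')' ['\\',')','*'])).flatMap
      (pvRep1 '/' ['\\','/','*']))

-- A's per-character effect
def pvStepA (l : Char) : List Char :=
  if l ∈ puncA then ['\\', l, '*'] else [l]

theorem stage_eq_step (ch : Char) : pvStageBS ch = pvStepA ch := by
  by_cases h1 : ch = '\\'
  · subst h1; decide
  by_cases h2 : ch = '?'
  · subst h2; decide
  by_cases h3 : ch = '('
  · subst h3; decide
  by_cases h4 : ch = ')'
  · subst h4; decide
  by_cases h5 : ch = '/'
  · subst h5; decide
  have hn : ch ∉ puncA := by simp [puncA, h1, h2, h3, h4, h5]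
  simp [pvStageBS, pvStepA, pvRep1, h1, h2, h3, h4, h5, hn]

theorem alt_toList (s : String) :
    (make_punc_regex_literal_alt s).toList = s.toList.flatMap pvStageBS := by
  unfold make_punc_regex_literal_alt puncB
  simp only [List.foldl_cons, List.foldl_nil]
  simp only [PySem.Str.toList_replace]
  have hoc : ∀ (c : Char), (String.ofList [c]).toList = [c] := by intro c; simp
  have hon : ∀ (a b c : Char), (String.ofList [a, b, c]).toList = [a, b, c] := by
    intro a b c; simp
  simp only [hoc, hon, replace_single, List.flatMap_assoc]
  refine congrFun (congrArg List.flatMap (funext fun ch => ?_)) s.toList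
  simp [pvStageBS, List.flatMap_assoc]

theorem a_foldl (cs : List Char) (acc : String) :
    (cs.foldl
      (fun fixed_str l =>
        if l ∈ puncA then fixed_str ++ "\\" ++ String.ofList [l] ++ "*"
        else fixed_str ++ String.ofList [l]) acc).toList
      = acc.toList ++ cs.flatMap pvStepA := by
  induction cs generalizing acc with
  | nil => simp
  | cons c cs ih =>
      rw [List.foldl_cons, ih]
      by_cases h : c ∈ puncA
      · simp [h, pvStepA, List.flatMap_cons]
      · simp [h, pvStepA, List.flatMap_cons]

-- ===== VERDICT (by name: the statement is the Claim_ definition above) =====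
theorem make_punc_regex_literal_spec : Claim_equal_make_punc_regex_literal := by
  intro s _
  unfold Spec_make_punc_regex_literal
  have h : (make_punc_regex_literal s).toList = (make_punc_regex_literal_alt s).toList := by
    unfold make_punc_regex_literal
    rw [a_foldl, alt_toList]
    simp [funext stage_eq_step]
  exact String.ext h
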